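-- pv_equiv track=rewrite | github.com/OximyHQ/mitmproxy | mitmproxy/addons/oximy/pipeline/operations/accumulate.py | _has_top_level_operator
-- ===== SOURCE A (Python) =====
-- def _has_top_level_operator(condition: str, operator: str) -> bool:
--     """Check if an operator exists at the top level (not inside parentheses)."""
--     depth = 0
--     for i, char in enumerate(condition):
--         if char == "(":
--             depth += 1
--         elif char == ")":
--             depth -= 1
--         elif depth == 0 and condition[i:].startswith(operator):
--             return True
--     return False
-- ===== SOURCE B (Python) =====
-- def _has_top_level_operator(condition: str, operator: str) -> bool:
--     """Jump between occurrences of the operator with str.find; an occurrence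
--     is top-level when its prefix contains as many '(' as ')'."""
--     start = 0
--     while True:
--         i = condition.find(operator, start)
--         if i == -1:
--             return False
--         prefix = condition[:i]
--         if prefix.count("(") == prefix.count(")"):
--             return True
--         start = i + 1
-- ===== Notes on version B (the rewrite author's own statement) =====
-- stated objective: alternative
-- what changed: Replaces A's per-character Python-level scan with a running depth counter by a str.find loop that jumps straight between occurrences of the operator (C-speed substring search) and tests each candidate's prefix for balanced parenthesis counts; Pre_ excludes the empty operator, a degenerate corner where find('') matches everywhere and neither program's value is specified.
-- intended difference: For operators whose first character is '(' or ')' that do occur at a parenthesis-balanced position, A always returns False because its elif chain handles parenthesis characters before ever testing startswith, while B returns True; reporting the occurrence is the intended behaviour of a top-level-operator test. — e.g. on _has_top_level_operator("(", "("): A returns false, B returns true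
-- outside the precondition, e.g. on _has_top_level_operator('((', ''): A returns False, B returns True
import Mathlib
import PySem

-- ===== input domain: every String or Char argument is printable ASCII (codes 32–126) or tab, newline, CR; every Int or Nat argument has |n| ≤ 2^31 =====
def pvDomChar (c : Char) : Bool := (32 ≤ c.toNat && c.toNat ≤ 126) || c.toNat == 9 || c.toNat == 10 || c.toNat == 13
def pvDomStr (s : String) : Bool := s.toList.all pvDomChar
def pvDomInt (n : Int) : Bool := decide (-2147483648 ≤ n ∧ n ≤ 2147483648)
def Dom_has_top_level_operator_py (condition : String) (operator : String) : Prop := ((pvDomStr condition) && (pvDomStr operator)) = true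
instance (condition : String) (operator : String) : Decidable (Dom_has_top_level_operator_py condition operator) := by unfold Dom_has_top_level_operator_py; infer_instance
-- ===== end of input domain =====

-- B replaces A's per-character depth scan by jumping between str.find occurrences of the
-- operator and testing the prefix's parenthesis counts (objective: alternative decomposition).

-- ===== PORT A =====
-- the for-loop over enumerate(condition): the current suffix IS condition[i:], depth is the running counter
def pvALoop (op : List Char) : List Char → Int → Bool
  | [], _ => false
  | c :: rest, depth =>
    if c = '(' then pvALoop op rest (depth + 1)
    else if c = ')' then pvALoop op rest (depth - 1)
    else if depth = 0 ∧ PySem.Chars.startswith (c :: rest) op = true then true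
    else pvALoop op rest depth

def has_top_level_operator_py (condition : String) (operator : String) : Bool :=
  pvALoop operator.toList condition.toList 0

-- ===== PORT B =====
-- the while-True loop of Source B: start is the loop variable, i = condition.find(operator, start);
-- fuel is only a totality guard: for a nonempty operator the loop runs at most len+1 times
-- (each found i satisfies start ≤ i < len, so start strictly grows and stays ≤ len)
def pvBLoop (cs op : List Char) : Nat → Nat → Bool
  | 0, _ => false
  | fuel + 1, start =>
    let i := PySem.Chars.findFrom cs op (start : Int)
    if i = -1 then false
    else if PySem.Chars.count (PySem.List.slice cs none (some i)) ['('] =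
              PySem.Chars.count (PySem.List.slice cs none (some i)) [')'] then true
    else pvBLoop cs op fuel (i.toNat + 1)

def has_top_level_operator_py_alt (condition : String) (operator : String) : Bool :=
  pvBLoop condition.toList operator.toList (condition.toList.length + 1) 0

-- ===== PRECONDITION & SPEC =====
-- Pre_ excludes only the empty operator, a degenerate corner where str.find('') matches at every
-- position: A happens to answer 'is there a top-level non-parenthesis character', B answers True;
-- neither value is specified, both are accidents of the respective loop.
def Pre_has_top_level_operator_py (condition : String) (operator : String) : Prop := operator ≠ ""
instance (condition : String) (operator : String) : Decidable (Pre_has_top_level_operator_py condition operator) := by unfold Pre_has_top_level_operator_py; infer_instance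
def pvWitness_has_top_level_operator_py : String × String := ("a+b", "+")

-- For operators whose first character is '(' or ')' that do occur at a parenthesis-balanced
-- position, A always returns False (its elif chain handles parenthesis characters before ever
-- testing startswith) while B returns True; reporting the occurrence is the intended behaviour.
def D_has_top_level_operator_py (condition : String) (operator : String) : Prop :=
  operator ≠ "" ∧
  (operator.toList.head? = some '(' ∨ operator.toList.head? = some ')') ∧
  ∃ j < condition.toList.length,
    (condition.toList.take j).count '(' = (condition.toList.take j).count ')' ∧
    operator.toList <+: condition.toList.drop j
instance (condition : String) (operator : String) : Decidable (D_has_top_level_operator_py condition operator) := by unfold D_has_top_level_operator_py; infer_instance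

def Spec_has_top_level_operator_py (condition : String) (operator : String) (out : Bool) : Prop := ¬ D_has_top_level_operator_py condition operator → out = has_top_level_operator_py_alt condition operator
instance (condition : String) (operator : String) (out : Bool) : Decidable (Spec_has_top_level_operator_py condition operator out) := by unfold Spec_has_top_level_operator_py; infer_instance

def pvDiffWitness_has_top_level_operator_py : String × String := ("(", "(")
def pvDiffWitnessOut_has_top_level_operator_py : Bool × Bool := (false, true)

-- ===== CLAIM (what is proved, stated in full; the proofs are below) =====
def Claim_unchanged_has_top_level_operator_py : Prop := ∀ (condition : String) (operator : String), Dom_has_top_level_operator_py condition operator → Pre_has_top_level_operator_py condition operator → Spec_has_top_level_operator_py condition operator (has_top_level_operator_py condition operator)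
def Claim_changed_has_top_level_operator_py : Prop := Dom_has_top_level_operator_py (pvDiffWitness_has_top_level_operator_py.1) (pvDiffWitness_has_top_level_operator_py.2) ∧ Pre_has_top_level_operator_py (pvDiffWitness_has_top_level_operator_py.1) (pvDiffWitness_has_top_level_operator_py.2) ∧ D_has_top_level_operator_py (pvDiffWitness_has_top_level_operator_py.1) (pvDiffWitness_has_top_level_operator_py.2) ∧ has_top_level_operator_py (pvDiffWitness_has_top_level_operator_py.1) (pvDiffWitness_has_top_level_operator_py.2) = pvDiffWitnessOut_has_top_level_operator_py.1 ∧ has_top_level_operator_py_alt (pvDiffWitness_has_top_level_operator_py.1) (pvDiffWitness_has_top_level_operator_py.2) = pvDiffWitnessOut_has_top_level_operator_py.2 ∧ pvDiffWitnessOut_has_top_level_operator_py.1 ≠ pvDiffWitnessOut_has_top_level_operator_py.2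
def Claim_exact_has_top_level_operator_py : Prop := ∀ (condition : String) (operator : String), Dom_has_top_level_operator_py condition operator → Pre_has_top_level_operator_py condition operator → D_has_top_level_operator_py condition operator → has_top_level_operator_py condition operator ≠ has_top_level_operator_py_alt condition operator

-- ===== LEMMAS AND PROOFS =====

-- "index j is a top-level occurrence of op": the common characterisation of both loops
def TopOcc (cs op : List Char) (j : Nat) : Prop :=
  (cs.take j).count '(' = (cs.take j).count ')' ∧ op <+: cs.drop j

lemma count_go_singleton (c : Char) :
    ∀ (fuel : Nat) (s : List Char) (acc : Nat), s.length ≤ fuel →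
      PySem.Chars.count.go [c] fuel s acc = acc + s.count c := by
  intro fuel
  induction fuel with
  | zero =>
    intro s acc h
    cases s with
    | nil => simp [PySem.Chars.count.go]
    | cons a t => simp at h
  | succ n ih =>
    intro s acc h
    cases s with
    | nil => simp [PySem.Chars.count.go]
    | cons a t =>
      rw [PySem.Chars.count.go]
      by_cases hac : c = a
      · subst hac
        simp only [List.isPrefixOf, beq_self_eq_true, Bool.true_and, if_true,
          List.length_cons, List.drop_succ_cons, List.length_nil, List.drop_zero]
        rw [ih t (acc + 1) (by simpa using Nat.le_of_succ_le_succ h)]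
        simp
        omega
      · have hb : (c == a) = false := by simp [hac]
        simp only [List.isPrefixOf, hb, Bool.false_and, Bool.false_eq_true, if_false]
        rw [ih t acc (by simpa using Nat.le_of_succ_le_succ h)]
        have hba : ¬ a = c := fun hh => hac hh.symm
        simp [hba]

lemma chars_count_singleton (s : List Char) (c : Char) :
    PySem.Chars.count s [c] = s.count c := by
  unfold PySem.Chars.count
  simp only [List.isEmpty_cons, if_false, Bool.false_eq_true]
  rw [count_go_singleton c s.length s 0 (le_refl _)]
  simp

lemma pvALoop_iff (op : List Char) :
    ∀ (s : List Char) (d : Int),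
      pvALoop op s d = true ↔
        ∃ j, ∃ _ : j < s.length,
          s[j]? ≠ some '(' ∧ s[j]? ≠ some ')' ∧
          d + ((s.take j).count '(' : Int) - ((s.take j).count ')' : Int) = 0 ∧
          op <+: s.drop j := by
  intro s
  induction s with
  | nil => intro d; simp [pvALoop]
  | cons a t ih =>
    intro d
    have hcnt : ∀ (j : Nat) (c : Char),
        (((a :: t).take (j + 1)).count c) = ((t.take j).count c) + (if a = c then 1 else 0) := by
      intro j c
      simp [List.take_succ_cons, List.count_cons]
    by_cases ha : a = '('
    · subst ha
      rw [pvALoop, if_pos rfl, ih]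
      constructor
      · rintro ⟨j, hj, h1, h2, h3, h4⟩
        refine ⟨j + 1, by simpa using Nat.succ_lt_succ hj, by simpa using h1,
          by simpa using h2, ?_, by simpa using h4⟩
        rw [hcnt, hcnt, (by decide : (if ('(':Char) = '(' then (1:Nat) else 0) = 1),
          (by decide : (if ('(':Char) = ')' then (1:Nat) else 0) = 0)]
        push_cast
        push_cast at h3
        omega
      · rintro ⟨j, hj, h1, h2, h3, h4⟩
        cases j with
        | zero => simp at h1
        | succ j =>
          refine ⟨j, by simpa using Nat.lt_of_succ_lt_succ hj, by simpa using h1,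
            by simpa using h2, ?_, by simpa using h4⟩
          rw [hcnt, hcnt, (by decide : (if ('(':Char) = '(' then (1:Nat) else 0) = 1),
            (by decide : (if ('(':Char) = ')' then (1:Nat) else 0) = 0)] at h3
          push_cast
          omega
    · by_cases hb : a = ')'
      · subst hb
        rw [pvALoop, if_neg (by decide), if_pos rfl, ih]
        constructor
        · rintro ⟨j, hj, h1, h2, h3, h4⟩
          refine ⟨j + 1, by simpa using Nat.succ_lt_succ hj, by simpa using h1,
            by simpa using h2, ?_, by simpa using h4⟩
          rw [hcnt, hcnt, (by decide : (if (')':Char) = '(' then (1:Nat) else 0) = 0),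
            (by decide : (if (')':Char) = ')' then (1:Nat) else 0) = 1)]
          push_cast
          omega
        · rintro ⟨j, hj, h1, h2, h3, h4⟩
          cases j with
          | zero => simp at h2
          | succ j =>
            refine ⟨j, by simpa using Nat.lt_of_succ_lt_succ hj, by simpa using h1,
              by simpa using h2, ?_, by simpa using h4⟩
            rw [hcnt, hcnt, (by decide : (if (')':Char) = '(' then (1:Nat) else 0) = 0),
              (by decide : (if (')':Char) = ')' then (1:Nat) else 0) = 1)] at h3
            push_cast at h3 ⊢
            omega
      · rw [pvALoop, if_neg ha, if_neg hb]
        by_cases hd : d = 0 ∧ PySem.Chars.startswith (a :: t) op = true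
        · rw [if_pos hd]
          constructor
          · intro _
            refine ⟨0, by simp, by simp [ha], by simp [hb], by simp [hd.1], ?_⟩
            simpa using (PySem.Chars.startswith_iff _ _).mp hd.2
          · intro _; rfl
        · rw [if_neg hd, ih]
          constructor
          · rintro ⟨j, hj, h1, h2, h3, h4⟩
            refine ⟨j + 1, by simpa using Nat.succ_lt_succ hj, by simpa using h1,
              by simpa using h2, ?_, by simpa using h4⟩
            rw [hcnt, hcnt, if_neg ha, if_neg hb]
            push_cast
            omega
          · rintro ⟨j, hj, h1, h2, h3, h4⟩
            cases j with
            | zero =>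
              exfalso
              apply hd
              simp only [List.take_zero, List.count_nil, List.drop_zero] at h3 h4
              exact ⟨by omega, (PySem.Chars.startswith_iff _ _).mpr h4⟩
            | succ j =>
              refine ⟨j, by simpa using Nat.lt_of_succ_lt_succ hj, by simpa using h1,
                by simpa using h2, ?_, by simpa using h4⟩
              rw [hcnt, hcnt, if_neg ha, if_neg hb] at h3
              push_cast at h3 ⊢
              omega

lemma pvBLoop_iff (cs op : List Char) (hop : op ≠ []) :
    ∀ (fuel start : Nat), start ≤ cs.length → cs.length + 1 ≤ fuel + start →
      (pvBLoop cs op fuel start = true ↔ ∃ j, start ≤ j ∧ TopOcc cs op j) := by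
  intro fuel
  induction fuel with
  | zero =>
    intro start hs hfuel
    have : start = cs.length := by omega
    subst this
    simp only [pvBLoop]
    constructor
    · intro hf; simp at hf
    · rintro ⟨j, hsj, -, h4⟩
      exfalso
      have hj : cs.drop j = [] := by
        have : cs.length ≤ j := hsj
        simp [List.drop_eq_nil_iff]
        omega
      rw [hj] at h4
      exact hop (List.prefix_nil.mp h4)
  | succ fuel ih =>
    intro start hs hfuel
    rw [pvBLoop]
    by_cases hi : PySem.Chars.findFrom cs op (start : Int) = -1
    · simp only [hi, if_true]
      constructor
      · intro hf; simp at hf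
      · rintro ⟨j, hsj, h3, h4⟩
        exfalso
        have hninf := (PySem.Chars.findFrom_natCast_eq_neg_one_iff cs op start hs).mp hi
        apply hninf
        have hdd : cs.drop j = (cs.drop start).drop (j - start) := by
          rw [List.drop_drop]; congr 1; omega
        rw [hdd] at h4
        exact h4.isInfix.trans (List.drop_suffix _ _).isInfix
    · simp only [if_neg hi]
      obtain ⟨hle, hpre, hmin⟩ := PySem.Chars.findFrom_natCast_spec cs op start hs hi
      set i := PySem.Chars.findFrom cs op (start : Int) with hidef
      have h0i : (0 : Int) ≤ i := le_trans (by exact_mod_cast Int.natCast_nonneg start) hle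
      have hstart_le : start ≤ i.toNat := by omega
      have hilt : i.toNat < cs.length := by
        have := hpre.length_le
        rw [List.length_drop] at this
        rcases List.exists_cons_of_ne_nil hop with ⟨c, r, rfl⟩
        simp at this
        omega
      have hslice : PySem.List.slice cs none (some i) = cs.take i.toNat :=
        PySem.List.slice_to cs h0i
      by_cases hbal : PySem.Chars.count (PySem.List.slice cs none (some i)) ['('] =
          PySem.Chars.count (PySem.List.slice cs none (some i)) [')']
      · simp only [if_pos hbal]
        constructor
        · intro _
          refine ⟨i.toNat, hstart_le, ?_, hpre⟩
          have hc := hbal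
          rw [hslice, chars_count_singleton, chars_count_singleton] at hc
          exact hc
        · intro _; trivial
      · simp only [if_neg hbal]
        rw [ih (i.toNat + 1) (by omega) (by omega)]
        constructor
        · rintro ⟨j, hsj, hj⟩
          exact ⟨j, by omega, hj⟩
        · rintro ⟨j, hsj, h3, h4⟩
          refine ⟨j, ?_, h3, h4⟩
          by_contra hcon
          push_neg at hcon
          rcases Nat.lt_or_ge j i.toNat with hlt2 | hge
          · exact hmin j hsj hlt2 h4
          · have hji : j = i.toNat := by omega
            subst hji
            apply hbal
            rw [hslice, chars_count_singleton, chars_count_singleton]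
            exact h3

lemma toList_ne_nil_of_ne_empty (s : String) (h : s ≠ "") : s.toList ≠ [] := by
  intro hnil
  apply h
  have := congrArg String.ofList hnil
  simpa using this

-- B = true iff some parenthesis-balanced occurrence exists (for a nonempty operator)
lemma alt_iff (condition operator : String) (h : operator.toList ≠ []) :
    has_top_level_operator_py_alt condition operator = true ↔
      ∃ j, TopOcc condition.toList operator.toList j := by
  unfold has_top_level_operator_py_alt
  rw [pvBLoop_iff condition.toList operator.toList h _ 0 (Nat.zero_le _) (by omega)]
  constructor
  · rintro ⟨j, -, hj⟩; exact ⟨j, hj⟩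
  · rintro ⟨j, hj⟩; exact ⟨j, Nat.zero_le j, hj⟩

-- for an operator starting with '(' or ')', A is always false
lemma a_false_of_paren_head (condition operator : String) (c : Char) (r : List Char)
    (hop : operator.toList = c :: r) (hc : c = '(' ∨ c = ')') :
    has_top_level_operator_py condition operator = false := by
  rw [← Bool.not_eq_true, has_top_level_operator_py, pvALoop_iff]
  rintro ⟨j, hj, h1, h2, -, h4⟩
  rw [hop] at h4
  have hhead : condition.toList[j]? = some c := by
    rw [← List.head?_drop]
    rcases h4 with ⟨t, ht⟩
    rw [← ht]
    simp
  rcases hc with rfl | rfl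
  · exact h1 hhead
  · exact h2 hhead

-- ===== VERDICT (by name: the statement is the Claim_ definition above) =====
theorem has_top_level_operator_py_spec : Claim_unchanged_has_top_level_operator_py := by
  intro condition operator _ hpre hnd
  have hop := toList_ne_nil_of_ne_empty operator hpre
  rcases List.exists_cons_of_ne_nil hop with ⟨c, r, hcr⟩
  by_cases hc : c = '(' ∨ c = ')'
  · -- A is constantly false; B is false too, else D_ would hold
    rw [a_false_of_paren_head condition operator c r hcr hc]
    by_contra hB
    have hBtrue : has_top_level_operator_py_alt condition operator = true := by
      cases hB2 : has_top_level_operator_py_alt condition operator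
      · exact absurd hB2.symm hB
      · rfl
    apply hnd
    obtain ⟨j, hbal, hprf⟩ := (alt_iff condition operator hop).mp hBtrue
    have hjlt : j < condition.toList.length := by
      have := hprf.length_le
      rw [List.length_drop, hcr] at this
      simp at this
      have hl : condition.toList.length = condition.length := by simp
      omega
    refine ⟨hpre, ?_, j, hjlt, hbal, hprf⟩
    rw [hcr]
    rcases hc with rfl | rfl
    · left; rfl
    · right; rfl
  · -- the operator's head is an ordinary character: both sides say 'some balanced occurrence'
    push_neg at hc
    rw [Bool.eq_iff_iff, has_top_level_operator_py, pvALoop_iff,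
      alt_iff condition operator hop]
    constructor
    · rintro ⟨j, hj, -, -, h3, h4⟩
      refine ⟨j, ?_, h4⟩
      omega
    · rintro ⟨j, hbal, hprf⟩
      have hjlt : j < condition.toList.length := by
        have := hprf.length_le
        rw [List.length_drop, hcr] at this
        simp at this
        have hl : condition.toList.length = condition.length := by simp
        omega
      have hhead : condition.toList[j]? = some c := by
        rw [← List.head?_drop]
        rcases hprf with ⟨t, ht⟩
        rw [← ht, hcr]
        simp
      refine ⟨j, hjlt, ?_, ?_, by omega, hprf⟩
      · rw [hhead]; intro hcon; exact hc.1 (by simpa using hcon)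
      · rw [hhead]; intro hcon; exact hc.2 (by simpa using hcon)

theorem has_top_level_operator_py_changed : Claim_changed_has_top_level_operator_py := by
  unfold Claim_changed_has_top_level_operator_py
  refine ⟨by decide, by decide, ?_, by decide, by decide, by decide⟩
  unfold D_has_top_level_operator_py
  refine ⟨by decide, by decide, 0, by decide, by decide, by decide⟩

theorem has_top_level_operator_py_tight : Claim_exact_has_top_level_operator_py := by
  intro condition operator _ hpre hD
  obtain ⟨-, hhead, j, hjlt, hbal, hprf⟩ := hD
  have hop := toList_ne_nil_of_ne_empty operator hpre
  rcases List.exists_cons_of_ne_nil hop with ⟨c, r, hcr⟩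
  have hc : c = '(' ∨ c = ')' := by
    rw [hcr] at hhead
    simp at hhead
    rcases hhead with h | h
    · left; omega
    · right; omega
  rw [a_false_of_paren_head condition operator c r hcr hc,
    (alt_iff condition operator hop).mpr ⟨j, hbal, hprf⟩]
  decide
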